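-- pv_equiv track=rewrite | github.com/MrTimedying/auditor_helper | src/analysis/analysis_module/variable_suggestions.py | _are_semantically_related
-- ===== SOURCE A (Python) =====
-- def _are_semantically_related(var1: str, var2: str) -> bool:
--     """Check if two variables are semantically related"""
--     # Performance metrics
--     performance_terms = ["fail", "error", "success", "rate", "score", "performance", "efficiency"]
--     var1_performance = any(term in var1 for term in performance_terms)
--     var2_performance = any(term in var2 for term in performance_terms)
--
--     if var1_performance and var2_performance:
--         return True
--
--     # Financial metrics
--     financial_terms = ["earning", "revenue", "profit", "cost", "bonus", "pay", "money"]
--     var1_financial = any(term in var1 for term in financial_terms)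
--     var2_financial = any(term in var2 for term in financial_terms)
--
--     if var1_financial and var2_financial:
--         return True
--
--     # Time-related metrics
--     time_terms = ["time", "duration", "speed", "pace"]
--     var1_time = any(term in var1 for term in time_terms)
--     var2_time = any(term in var2 for term in time_terms)
--
--     if var1_time and var2_time:
--         return True
--
--     return False
-- ===== SOURCE B (Python) =====
-- def _are_semantically_related(var1: str, var2: str) -> bool:
--     """Check if two variables are semantically related"""
--     categories = [
--         ["fail", "error", "success", "rate", "score", "performance", "efficiency"],
--         ["earning", "revenue", "profit", "cost", "bonus", "pay", "money"],
--         ["time", "duration", "speed", "pace"],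
--     ]
--     # all ordered pairs of terms drawn from the same category
--     pairs = [(a, b) for terms in categories for a in terms for b in terms]
--     return any(a in var1 and b in var2 for a, b in pairs)
-- ===== Notes on version B (the rewrite author's own statement) =====
-- stated objective: alternative
-- what changed: B flattens each category into its Cartesian square of term pairs and does one flat scan testing 'a in var1 and b in var2' per pair, eliminating both the per-category both-variable blocks and any per-variable category computation.
import Mathlib
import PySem

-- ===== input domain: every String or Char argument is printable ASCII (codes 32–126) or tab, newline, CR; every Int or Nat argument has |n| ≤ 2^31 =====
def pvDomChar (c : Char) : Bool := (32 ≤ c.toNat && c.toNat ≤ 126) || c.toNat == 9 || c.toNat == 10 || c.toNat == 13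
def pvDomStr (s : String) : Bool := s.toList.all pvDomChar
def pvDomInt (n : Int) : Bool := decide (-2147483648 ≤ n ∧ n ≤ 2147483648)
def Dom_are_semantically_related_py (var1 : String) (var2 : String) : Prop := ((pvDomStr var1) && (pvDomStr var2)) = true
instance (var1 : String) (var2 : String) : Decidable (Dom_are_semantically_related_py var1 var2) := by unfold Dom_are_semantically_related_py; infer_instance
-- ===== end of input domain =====

-- B replaces A's three per-category both-variable blocks by one flat scan over the Cartesian square of each category's terms, testing 'a in var1 and b in var2' per pair (objective: alternative decomposition, same observable result).


-- ===== PORT A =====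
def are_semantically_related_py (var1 : String) (var2 : String) : Bool :=
  let performance_terms := ["fail", "error", "success", "rate", "score", "performance", "efficiency"]
  let var1_performance := performance_terms.any (fun term => PySem.Str.isIn term var1)
  let var2_performance := performance_terms.any (fun term => PySem.Str.isIn term var2)
  if var1_performance && var2_performance then true
  else
    let financial_terms := ["earning", "revenue", "profit", "cost", "bonus", "pay", "money"]
    let var1_financial := financial_terms.any (fun term => PySem.Str.isIn term var1)
    let var2_financial := financial_terms.any (fun term => PySem.Str.isIn term var2)
    if var1_financial && var2_financial then true
    else
      let time_terms := ["time", "duration", "speed", "pace"]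
      let var1_time := time_terms.any (fun term => PySem.Str.isIn term var1)
      let var2_time := time_terms.any (fun term => PySem.Str.isIn term var2)
      if var1_time && var2_time then true
      else false

-- ===== PORT B =====
def pvCategories : List (List String) :=
  [["fail", "error", "success", "rate", "score", "performance", "efficiency"],
   ["earning", "revenue", "profit", "cost", "bonus", "pay", "money"],
   ["time", "duration", "speed", "pace"]]

-- pairs = [(a, b) for terms in categories for a in terms for b in terms]
def pvPairs : List (String × String) :=
  pvCategories.flatMap (fun terms => terms.flatMap (fun a => terms.map (fun b => (a, b))))

def are_semantically_related_py_alt (var1 : String) (var2 : String) : Bool :=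
  pvPairs.any (fun p => PySem.Str.isIn p.1 var1 && PySem.Str.isIn p.2 var2)

-- ===== PRECONDITION & SPEC =====
def Spec_are_semantically_related_py (var1 : String) (var2 : String) (out : Bool) : Prop := out = are_semantically_related_py_alt var1 var2
instance (var1 : String) (var2 : String) (out : Bool) : Decidable (Spec_are_semantically_related_py var1 var2 out) := by unfold Spec_are_semantically_related_py; infer_instance

-- ===== CLAIM (what is proved, stated in full; the proofs are below) =====
def Claim_equal_are_semantically_related_py : Prop := ∀ (var1 : String) (var2 : String), Dom_are_semantically_related_py var1 var2 → Spec_are_semantically_related_py var1 var2 (are_semantically_related_py var1 var2)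

-- ===== LEMMAS AND PROOFS =====
-- Scanning the pairs (x,b), b <- l2, matches iff x matches var1 and some b matches var2.
theorem pv_row_any (l2 : List String) (x : String) (v1 v2 : String) :
    (l2.any ((fun p : String × String => PySem.Str.isIn p.1 v1 && PySem.Str.isIn p.2 v2) ∘ fun b => (x, b)))
      = (PySem.Str.isIn x v1 && l2.any (fun t => PySem.Str.isIn t v2)) := by
  induction l2 with
  | nil => simp
  | cons y ys ihy => simp only [List.any_cons, Function.comp_apply, ihy, Bool.and_or_distrib_left]

-- A scan over the pairs [(a,b) | a <- l1, b <- l2] matches iff var1 matches l1 and var2 matches l2.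
theorem pv_pair_any (l1 l2 : List String) (v1 v2 : String) :
    (l1.flatMap (fun a => l2.map (fun b => (a, b)))).any
        (fun p => PySem.Str.isIn p.1 v1 && PySem.Str.isIn p.2 v2)
      = (l1.any (fun t => PySem.Str.isIn t v1) && l2.any (fun t => PySem.Str.isIn t v2)) := by
  induction l1 with
  | nil => simp
  | cons x xs ih =>
    rw [List.flatMap_cons, List.any_append, ih, List.any_map, List.any_cons, pv_row_any]
    cases PySem.Str.isIn x v1 <;>
      cases xs.any (fun t => PySem.Str.isIn t v1) <;>
      cases l2.any (fun t => PySem.Str.isIn t v2) <;> rfl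

-- B's flat pair scan, characterized per category.
theorem pv_alt_eq (v1 v2 : String) :
    are_semantically_related_py_alt v1 v2 =
      ((["fail", "error", "success", "rate", "score", "performance", "efficiency"].any (fun t => PySem.Str.isIn t v1) &&
        ["fail", "error", "success", "rate", "score", "performance", "efficiency"].any (fun t => PySem.Str.isIn t v2)) ||
       (["earning", "revenue", "profit", "cost", "bonus", "pay", "money"].any (fun t => PySem.Str.isIn t v1) &&
        ["earning", "revenue", "profit", "cost", "bonus", "pay", "money"].any (fun t => PySem.Str.isIn t v2)) ||
       (["time", "duration", "speed", "pace"].any (fun t => PySem.Str.isIn t v1) &&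
        ["time", "duration", "speed", "pace"].any (fun t => PySem.Str.isIn t v2))) := by
  unfold are_semantically_related_py_alt pvPairs pvCategories
  rw [List.any_flatMap, List.any_cons, List.any_cons, List.any_cons, List.any_nil]
  rw [pv_pair_any, pv_pair_any, pv_pair_any]
  rw [Bool.or_false, Bool.or_assoc]

-- ===== VERDICT (by name: the statement is the Claim_ definition above) =====
theorem are_semantically_related_py_spec : Claim_equal_are_semantically_related_py := by
  intro var1 var2 _
  unfold Spec_are_semantically_related_py
  rw [pv_alt_eq]
  simp only [are_semantically_related_py]
  generalize (["fail", "error", "success", "rate", "score", "performance", "efficiency"].any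
      (fun t => PySem.Str.isIn t var1)) = p1
  generalize (["fail", "error", "success", "rate", "score", "performance", "efficiency"].any
      (fun t => PySem.Str.isIn t var2)) = p2
  generalize (["earning", "revenue", "profit", "cost", "bonus", "pay", "money"].any
      (fun t => PySem.Str.isIn t var1)) = f1
  generalize (["earning", "revenue", "profit", "cost", "bonus", "pay", "money"].any
      (fun t => PySem.Str.isIn t var2)) = f2
  generalize (["time", "duration", "speed", "pace"].any
      (fun t => PySem.Str.isIn t var1)) = t1
  generalize (["time", "duration", "speed", "pace"].any
      (fun t => PySem.Str.isIn t var2)) = t2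
  cases p1 <;> cases p2 <;> cases f1 <;> cases f2 <;> cases t1 <;> cases t2 <;> simp
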